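-- pv_equiv track=rewrite | github.com/mrispoli97/DemoServices | obfuscation/dead_code_injection/dead_code_injection.py | _initInstructions
-- ===== SOURCE A (Python) =====
-- def _initInstructions(instructions):
--     bytes = {}
--     for instruction in instructions:
--         num_bytes = len(instruction)
--         if num_bytes not in bytes:
--             bytes[num_bytes] = []
--         bytes[num_bytes].append(instruction)
--     return bytes
-- ===== SOURCE B (Python) =====
-- def _initInstructions(instructions):
--     lengths = list(dict.fromkeys(len(i) for i in instructions))
--     return {n: [i for i in instructions if len(i) == n] for n in lengths}
-- ===== Notes on version B (the rewrite author's own statement) =====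
-- stated objective: idiomatic
-- what changed: Replaces A's incremental dict-building loop (ensure key, append) with a two-pass dict comprehension: dedup the lengths in first-occurrence order, then filter the instructions once per distinct length.
import Mathlib
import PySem

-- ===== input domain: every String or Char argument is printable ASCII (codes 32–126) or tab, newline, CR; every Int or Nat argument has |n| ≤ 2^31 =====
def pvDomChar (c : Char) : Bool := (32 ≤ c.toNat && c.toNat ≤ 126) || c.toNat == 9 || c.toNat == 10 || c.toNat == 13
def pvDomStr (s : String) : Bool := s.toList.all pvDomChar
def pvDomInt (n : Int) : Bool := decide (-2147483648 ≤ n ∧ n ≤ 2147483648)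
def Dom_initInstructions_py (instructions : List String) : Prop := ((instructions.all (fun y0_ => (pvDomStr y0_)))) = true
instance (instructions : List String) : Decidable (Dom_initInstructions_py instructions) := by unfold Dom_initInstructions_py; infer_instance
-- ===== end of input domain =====

-- B groups the instructions by length via dedup'd lengths + one filter per length (idiomatic
-- dict comprehension) instead of A's incremental dict-insertion loop; same result, not faster.

-- ===== PORT A =====
-- per-element loop: ensure key exists, then append (dict ops via PySem.Dict)
def initInstructions_py (instructions : List String) : List (Int × List String) :=
  (instructions.foldl (fun bytes instruction =>
      let numBytes : Int := PySem.Str.len instruction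
      let bytes := if !(bytes.contains numBytes) then bytes.insert numBytes ([] : List String) else bytes
      bytes.modify numBytes [] (fun l => l ++ [instruction]))
    PySem.Dict.empty).items

-- ===== PORT B =====
-- dict.fromkeys dedup of the lengths (PySem.List.dedup), then a filter comprehension per length
def initInstructions_py_alt (instructions : List String) : List (Int × List String) :=
  let lengths := PySem.List.dedup (instructions.map PySem.Str.len)
  lengths.map (fun n => (n, instructions.filter (fun i => PySem.Str.len i == n)))

-- ===== PRECONDITION & SPEC =====
def Spec_initInstructions_py (instructions : List String) (out : List (Int × List String)) : Prop := out = initInstructions_py_alt instructions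
instance (instructions : List String) (out : List (Int × List String)) : Decidable (Spec_initInstructions_py instructions out) := by unfold Spec_initInstructions_py; infer_instance

-- ===== CLAIM (what is proved, stated in full; the proofs are below) =====
def Claim_equal_initInstructions_py : Prop := ∀ (instructions : List String), Dom_initInstructions_py instructions → Spec_initInstructions_py instructions (initInstructions_py instructions)

-- ===== LEMMAS AND PROOFS =====

-- B's value after processing the prefix `pre` (the loop invariant shape of A's dict)
def pvGroups (pre : List String) : List (Int × List String) :=
  (PySem.List.dedup (pre.map PySem.Str.len)).map
    (fun n => (n, pre.filter (fun i => PySem.Str.len i == n)))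

lemma find?_map_keys (l : List Int) (g : Int → List String) (k : Int) :
    (l.map (fun m => (m, g m))).find? (fun p => p.1 == k)
      = if k ∈ l then some (k, g k) else none := by
  induction l with
  | nil => simp
  | cons m t ih =>
    by_cases h : m = k
    · subst h; simp
    · simp [h, ih, Ne.symm h]

lemma any_map_keys (l : List Int) (g : Int → List String) (k : Int) :
    (l.map (fun m => (m, g m))).any (fun p => p.1 == k) = decide (k ∈ l) := by
  induction l with
  | nil => simp
  | cons m t ih =>
    by_cases h : m = k
    · simp [h]
    · simp [h, ih, Ne.symm h]

lemma dedup_append_singleton (l : List Int) (a : Int) :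
    PySem.List.dedup (l ++ [a])
      = if a ∈ l then PySem.List.dedup l else PySem.List.dedup l ++ [a] := by
  rw [PySem.List.dedup_eq_ofList, PySem.Set.ofList_eq_foldl, List.foldl_append]
  rw [← PySem.Set.ofList_eq_foldl, ← PySem.List.dedup_eq_ofList]
  simp only [List.foldl]
  by_cases h : a ∈ l
  · simp [PySem.Set.add, PySem.Set.contains, h]
  · simp [PySem.Set.add, PySem.Set.contains, h]

lemma filter_append_singleton (pre : List String) (x : String) (n : Int) :
    (pre ++ [x]).filter (fun i => PySem.Str.len i == n)
      = pre.filter (fun i => PySem.Str.len i == n)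
        ++ (if PySem.Str.len x = n then [x] else []) := by
  rw [List.filter_append, List.filter_singleton]
  by_cases h : PySem.Str.len x = n
  · rw [beq_iff_eq.mpr h, if_pos h, cond_true]
  · rw [beq_eq_false_iff_ne.mpr h, if_neg h, cond_false]

lemma map_len_append_singleton (pre : List String) (x : String) :
    (pre ++ [x]).map PySem.Str.len = pre.map PySem.Str.len ++ [PySem.Str.len x] := by
  simp

-- one iteration of A's loop preserves the invariant
lemma step_groups (pre : List String) (x : String) :
    (let numBytes : Int := PySem.Str.len x;
     let bytes := if !((PySem.Dict.mk (pvGroups pre)).contains numBytes)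
       then (PySem.Dict.mk (pvGroups pre)).insert numBytes ([] : List String)
       else PySem.Dict.mk (pvGroups pre);
     bytes.modify numBytes [] (fun l => l ++ [x]))
    = PySem.Dict.mk (pvGroups (pre ++ [x])) := by
  simp only [pvGroups, PySem.Dict.modify, PySem.Dict.insert, PySem.Dict.contains,
    PySem.Dict.getD, PySem.Dict.get?, map_len_append_singleton, dedup_append_singleton]
  by_cases h : PySem.Str.len x ∈ pre.map PySem.Str.len
  · have hmem : PySem.Str.len x ∈ PySem.List.dedup (pre.map PySem.Str.len) :=
      (PySem.List.mem_dedup _ _).mpr h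
    simp only [h, if_true, any_map_keys, find?_map_keys, hmem, decide_true,
      Bool.not_true, Bool.false_eq_true, if_false, Option.map_some, Option.getD_some]
    congr 1
    rw [List.map_map]
    apply List.map_congr_left
    intro m hm
    by_cases hmx : m = PySem.Str.len x
    · subst hmx
      simp only [Function.comp, BEq.rfl, if_true, filter_append_singleton]
    · have hb : (m == PySem.Str.len x) = false := beq_eq_false_iff_ne.mpr hmx
      simp only [Function.comp, hb, Bool.false_eq_true, if_false,
        filter_append_singleton, if_neg (Ne.symm hmx), List.append_nil]
  · have hmem : PySem.Str.len x ∉ PySem.List.dedup (pre.map PySem.Str.len) :=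
      fun hx => h ((PySem.List.mem_dedup _ _).mp hx)
    have hfil : pre.filter (fun i => PySem.Str.len i == PySem.Str.len x) = [] := by
      rw [List.filter_eq_nil_iff]
      intro i hi hbeq
      exact h (List.mem_map.mpr ⟨i, hi, (eq_of_beq hbeq)⟩)
    simp only [h, if_false, any_map_keys, hmem, decide_false, Bool.not_false, if_true]
    simp only [List.any_append, any_map_keys, hmem, decide_false,
      Bool.false_or, List.any_cons, List.any_nil, BEq.rfl, Bool.true_or,
      Bool.false_eq_true, if_false,
      List.find?_append, find?_map_keys, Option.none_or]
    simp only [List.find?, BEq.rfl, Option.map_some, Option.getD_some]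
    rw [if_pos trivial]
    congr 1
    rw [List.map_append, List.map_append, List.map_map]
    congr 1
    · apply List.map_congr_left
      intro m hm
      have hmx : ¬ m = PySem.Str.len x := by
        intro e; exact hmem (e ▸ hm)
      have hb : (m == PySem.Str.len x) = false := beq_eq_false_iff_ne.mpr hmx
      simp only [Function.comp, hb, Bool.false_eq_true, if_false,
        filter_append_singleton, if_neg (Ne.symm hmx), List.append_nil]
    · simp only [List.map_cons, List.map_nil, BEq.rfl,
        filter_append_singleton, hfil, List.nil_append]
      simp

-- A's whole loop, started from the dict that groups `pre`, groups `pre ++ rest`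
lemma main_loop (rest pre : List String) :
    (rest.foldl (fun bytes instruction =>
      let numBytes : Int := PySem.Str.len instruction
      let bytes := if !(bytes.contains numBytes) then bytes.insert numBytes ([] : List String) else bytes
      bytes.modify numBytes [] (fun l => l ++ [instruction]))
      (PySem.Dict.mk (pvGroups pre)))
    = PySem.Dict.mk (pvGroups (pre ++ rest)) := by
  induction rest generalizing pre with
  | nil => simp
  | cons x t ih =>
    rw [List.foldl_cons, step_groups pre x, ih]
    simp

-- ===== VERDICT (by name: the statement is the Claim_ definition above) =====
theorem initInstructions_py_spec : Claim_equal_initInstructions_py := by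
  intro instructions _
  unfold Spec_initInstructions_py initInstructions_py
  have h0 : (PySem.Dict.empty : PySem.Dict Int (List String)) = PySem.Dict.mk (pvGroups []) := rfl
  rw [h0, main_loop]
  simp [pvGroups, initInstructions_py_alt]
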